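-- pv_equiv track=rewrite | github.com/programmer-666/Cryptography | Symetric/Playfair.py | textToBlock
-- ===== SOURCE A (Python) =====
-- def checkTextLen(text, c):# text kontrol eder, çift değilse c değerini ekler
--     if len(text)%2!=0:
--         text+=str(c)
--     return text
--
-- def textToBlock(text):
--     block = []
--     text = checkTextLen(text, 'x')
--     f = True
--     r = ""
--     for i in text:
--         if f:
--             r+=str(i)
--             f = False
--         else:
--             r+=str(i)
--             block.append(r)
--             r=""
--             f=True
--     return block
-- ===== SOURCE B (Python) =====
-- def checkTextLen(text, c):
--     if len(text) % 2 != 0: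
--         text += str(c)
--     return text
--
-- def textToBlock(text):
--     text = checkTextLen(text, 'x')
--     return [a + b for a, b in zip(text[0::2], text[1::2])]
-- ===== Notes on version B (the rewrite author's own statement) =====
-- stated objective: simpler
-- what changed: Replaces the char-by-char scan with a boolean flag and string accumulator by pairing the two strided slices text[0::2] and text[1::2] with zip after padding.
import Mathlib
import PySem

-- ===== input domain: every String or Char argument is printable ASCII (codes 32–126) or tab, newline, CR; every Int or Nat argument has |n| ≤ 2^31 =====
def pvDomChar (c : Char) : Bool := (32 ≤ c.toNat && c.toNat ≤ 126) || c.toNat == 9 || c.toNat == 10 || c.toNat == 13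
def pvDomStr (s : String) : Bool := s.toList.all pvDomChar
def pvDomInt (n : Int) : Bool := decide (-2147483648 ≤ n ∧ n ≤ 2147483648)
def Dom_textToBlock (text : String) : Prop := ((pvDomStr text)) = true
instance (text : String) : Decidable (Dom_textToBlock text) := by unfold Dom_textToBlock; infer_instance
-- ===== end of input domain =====

-- B pairs the two strided slices text[0::2] and text[1::2] with zip (after the same padding)
-- instead of A's char-by-char scan with a boolean flag and a string accumulator; objective: simpler.

-- ===== PORT A =====
def pvCheckTextLenA (text : String) (c : String) : String :=
  if PySem.Str.len text % 2 ≠ 0 then text ++ c else text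

def pvStepA (st : List String × String × Bool) (i : Char) : List String × String × Bool :=
  match st with
  | (block, r, f) =>
    if f then (block, r.push i, false)
    else (block ++ [r.push i], "", true)

def textToBlock (text : String) : List String :=
  let text := pvCheckTextLenA text "x"
  ((text.toList.foldl pvStepA ([], "", true))).1

-- ===== PORT B =====
def pvCheckTextLenB (text : String) (c : String) : String :=
  if PySem.Str.len text % 2 ≠ 0 then text ++ c else text

def textToBlock_alt (text : String) : List String :=
  let t := (pvCheckTextLenB text "x").toList
  let evens := (PySem.List.slice? t (some 0) none 2).getD []   -- text[0::2]
  let odds  := (PySem.List.slice? t (some 1) none 2).getD []   -- text[1::2]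
  (evens.zip odds).map (fun ab => String.ofList [ab.1, ab.2])

-- ===== PRECONDITION & SPEC =====
def Spec_textToBlock (text : String) (out : List String) : Prop := out = textToBlock_alt text
instance (text : String) (out : List String) : Decidable (Spec_textToBlock text out) := by unfold Spec_textToBlock; infer_instance

-- ===== CLAIM (what is proved, stated in full; the proofs are below) =====
def Claim_equal_textToBlock : Prop := ∀ (text : String), Dom_textToBlock text → Spec_textToBlock text (textToBlock text)

-- ===== LEMMAS AND PROOFS =====

def pvEvens : List Char → List Char
  | [] => []
  | [a] => [a]
  | a :: _ :: t => a :: pvEvens t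

def pvOdds : List Char → List Char
  | [] => []
  | [_] => []
  | _ :: b :: t => b :: pvOdds t

def pvPairs : List Char → List String
  | [] => []
  | [_] => []
  | a :: b :: t => String.ofList [a, b] :: pvPairs t

lemma pvEvens_spec : ∀ l : List Char,
    (List.range ((l.length + 1) / 2)).filterMap (fun k => l[2 * k]?) = pvEvens l := by
  intro l
  induction l using pvEvens.induct with
  | case1 => simp [pvEvens]
  | case2 a => simp [pvEvens]
  | case3 a b t ih =>
    have hlen : ((a :: b :: t).length + 1) / 2 = (t.length + 1) / 2 + 1 := by
      simp; omega
    rw [hlen, List.range_succ_eq_map]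
    simp only [List.filterMap_cons, List.filterMap_map]
    have : ((fun k => (a :: b :: t)[2 * k]?) ∘ Nat.succ) = (fun k => t[2 * k]?) := by
      funext k
      have h2 : 2 * Nat.succ k = 2 * k + 1 + 1 := by omega
      simp [Function.comp, h2]
    rw [this, ih]
    simp [pvEvens]

lemma pvOdds_spec : ∀ l : List Char,
    (List.range (l.length / 2)).filterMap (fun k => l[2 * k + 1]?) = pvOdds l := by
  intro l
  induction l using pvOdds.induct with
  | case1 => simp [pvOdds]
  | case2 a => simp [pvOdds]
  | case3 a b t ih =>
    have hlen : (a :: b :: t).length / 2 = t.length / 2 + 1 := by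
      simp; omega
    rw [hlen, List.range_succ_eq_map]
    simp only [List.filterMap_cons, List.filterMap_map]
    have : ((fun k => (a :: b :: t)[2 * k + 1]?) ∘ Nat.succ) = (fun k => t[2 * k + 1]?) := by
      funext k
      have h2 : 2 * Nat.succ k + 1 = 2 * k + 1 + 1 + 1 := by omega
      simp [Function.comp, h2]
    rw [this, ih]
    simp [pvOdds]

lemma pvSlice_evens (l : List Char) :
    PySem.List.slice? l (some 0) none 2 = some (pvEvens l) := by
  rw [PySem.List.slice?, PySem.List.sliceIndices]
  simp only [if_neg (by norm_num : ¬ ((2:Int) = 0))]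
  have hstart : (if (0:Int) < 0 then max (0 + (l.length:Int)) 0 else min 0 (l.length:Int)) = 0 := by
    simp only [if_neg (lt_irrefl (0:Int))]; omega
  have hcount : (if (0:Int) < 2 then
      (if (0:Int) < (l.length:Int) then (((l.length:Int) - 0 + 2 - 1) / 2).toNat else 0)
      else if (l.length:Int) < 0 then (((0:Int) - (l.length:Int) + -2 - 1) / -2).toNat else 0)
      = (l.length + 1) / 2 := by
    split_ifs <;> omega
  simp only [if_neg (by norm_num : ¬ ((2:Int) < 0)), hstart]
  rw [hcount]
  congr 1
  rw [← pvEvens_spec l]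
  apply List.filterMap_congr
  intro k _
  have : ((0:Int) + 2 * (k:Int)).toNat = 2 * k := by omega
  rw [this]

lemma pvSlice_odds (l : List Char) :
    PySem.List.slice? l (some 1) none 2 = some (pvOdds l) := by
  rw [PySem.List.slice?, PySem.List.sliceIndices]
  simp only [if_neg (by norm_num : ¬ ((2:Int) = 0)), if_neg (by norm_num : ¬ ((2:Int) < 0))]
  have hstart : (if (1:Int) < 0 then max (1 + (l.length:Int)) 0 else min 1 (l.length:Int)) = min 1 (l.length:Int) := by
    simp only [if_neg (by norm_num : ¬ ((1:Int) < 0))]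
  rw [hstart]
  rcases Nat.eq_zero_or_pos l.length with h0 | hpos
  · rcases List.length_eq_zero_iff.mp h0 with rfl
    simp [pvOdds]
  · have h1 : min (1:Int) (l.length:Int) = 1 := by omega
    rw [h1]
    have hcount : (if (1:Int) < (l.length:Int) then (((l.length:Int) - 1 + 2 - 1) / 2).toNat else 0)
        = l.length / 2 := by
      split_ifs with h2 <;> omega
    rw [hcount]
    congr 1
    rw [← pvOdds_spec l]
    apply List.filterMap_congr
    intro k _
    have : ((1:Int) + 2 * (k:Int)).toNat = 2 * k + 1 := by omega
    rw [this]

lemma pvPush_two (a b : Char) : ("".push a).push b = String.ofList [a, b] := by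
  apply String.ext; simp

lemma pvFoldA_spec : ∀ l : List Char, l.length % 2 = 0 → ∀ block : List String,
    (l.foldl pvStepA (block, "", true)).1 = block ++ pvPairs l := by
  intro l
  induction l using pvPairs.induct with
  | case1 => intro _ block; simp [pvPairs]
  | case2 a => intro h; simp at h
  | case3 a b t ih =>
    intro h block
    have ht : t.length % 2 = 0 := by simp at h; omega
    simp only [List.foldl_cons, pvStepA, if_true, Bool.false_eq_true, if_false]
    rw [ih ht]
    simp [pvPairs, pvPush_two, List.append_assoc]

lemma pvZip_spec : ∀ l : List Char, l.length % 2 = 0 →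
    ((pvEvens l).zip (pvOdds l)).map (fun ab => String.ofList [ab.1, ab.2]) = pvPairs l := by
  intro l
  induction l using pvPairs.induct with
  | case1 => intro _; simp [pvEvens, pvOdds, pvPairs]
  | case2 a => intro h; simp at h
  | case3 a b t ih =>
    intro h
    have ht : t.length % 2 = 0 := by simp at h; omega
    simp only [pvEvens, pvOdds, pvPairs, List.zip_cons_cons, List.map_cons]
    rw [ih ht]

lemma pvPadded_even (text : String) : ((pvCheckTextLenA text "x").toList).length % 2 = 0 := by
  rw [pvCheckTextLenA]
  split_ifs with h
  · rw [PySem.Str.len_eq] at h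
    simp only [String.toList_append]
    simp only [List.length_append]
    simp at h ⊢
    omega
  · rw [PySem.Str.len_eq] at h
    omega

-- ===== VERDICT (by name: the statement is the Claim_ definition above) =====
theorem textToBlock_spec : Claim_equal_textToBlock := by
  intro text _
  unfold Spec_textToBlock textToBlock textToBlock_alt
  show (List.foldl pvStepA ([], "", true) (pvCheckTextLenA text "x").toList).1 =
      List.map (fun ab => String.ofList [ab.1, ab.2])
        (((PySem.List.slice? (pvCheckTextLenA text "x").toList (some 0) none 2).getD []).zip
         ((PySem.List.slice? (pvCheckTextLenA text "x").toList (some 1) none 2).getD []))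
  have heven := pvPadded_even text
  rw [pvSlice_evens, pvSlice_odds]
  simp only [Option.getD_some]
  rw [pvZip_spec _ heven, pvFoldA_spec _ heven []]
  simp
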